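-- pv_equiv track=rewrite | github.com/struggling-student/PythonExercises | Esami/2021-2022/Esame-1/program.aspo.py | build
-- ===== SOURCE A (Python) =====
-- def build(strings, n):
--     if n == 1:
--         return strings
--     res = set()
--
--     for string in strings:
--         words = build(strings-{string}, n-1)
--         for word in words:
--             res.add(string+word)
--     return res
-- ===== SOURCE B (Python) =====
-- def build(strings, n):
--     if n == 1:
--         return strings
--     if n < 1:
--         return set()
--     frontier = [("", strings)]
--     for _ in range(n):
--         if not frontier:
--             break
--         frontier = [(p + s, rem - {s}) for (p, rem) in frontier for s in rem]
--     return {p for (p, _) in frontier}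
-- ===== Notes on version B (the rewrite author's own statement) =====
-- stated objective: alternative
-- what changed: A's top-down recursion (which rebuilds and dedups a result set at every recursive call) is replaced by an iterative breadth-first frontier of (prefix, remaining-set) pairs expanded n times with an early exit on an empty frontier and a single dedup at the end.
import Mathlib
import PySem

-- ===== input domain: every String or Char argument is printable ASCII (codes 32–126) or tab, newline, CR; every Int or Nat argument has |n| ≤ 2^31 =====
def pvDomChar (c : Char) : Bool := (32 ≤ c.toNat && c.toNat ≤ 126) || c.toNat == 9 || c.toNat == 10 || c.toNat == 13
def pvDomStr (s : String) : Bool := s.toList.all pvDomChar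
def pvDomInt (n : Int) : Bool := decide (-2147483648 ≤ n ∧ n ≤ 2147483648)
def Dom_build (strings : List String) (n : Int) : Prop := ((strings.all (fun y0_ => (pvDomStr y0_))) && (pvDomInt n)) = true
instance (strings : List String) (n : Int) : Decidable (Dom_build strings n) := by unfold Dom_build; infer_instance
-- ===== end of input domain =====

-- B replaces A's recursion (which re-derives each sub-result and dedups at every level) by an
-- iterative breadth-first frontier of (prefix, remaining-set) pairs with a single final dedup;
-- objective: alternative (same cost class). Both Pythons take/return sets (order-insensitive).

-- termination helper for port A: removing a member of the set makes it shorter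
theorem pvDiffLenLt (σ : List String) (s : String) (h : s ∈ σ) :
    (PySem.Set.diff σ [s]).length < σ.length := by
  simp only [PySem.Set.diff]
  rw [List.length_filter_lt_length_iff_exists]
  exact ⟨s, h, by simp⟩

-- ===== PORT A =====
def build (strings : List String) (n : Int) : List String :=
  if n = 1 then strings
  else
    strings.attach.foldl
      (fun res st =>
        (build (PySem.Set.diff strings [st.1]) (n - 1)).foldl
          (fun r w => PySem.Set.add r (st.1 ++ w)) res)
      []
termination_by strings.length
decreasing_by exact pvDiffLenLt strings st.1 st.2

-- ===== PORT B =====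
-- one BFS step: extend every (prefix, remaining) pair by each still-available string
def pvExpand (f : List (String × List String)) : List (String × List String) :=
  f.flatMap (fun pr => pr.2.map (fun s => (pr.1 ++ s, PySem.Set.diff pr.2 [s])))

-- the 'for _ in range(n): if not frontier: break; frontier = …' loop
def pvLoop : Nat → List (String × List String) → List (String × List String)
  | 0, f => f
  | k + 1, f => if f = [] then f else pvLoop k (pvExpand f)

def build_alt (strings : List String) (n : Int) : List String :=
  if n = 1 then strings
  else if n < 1 then []
  else PySem.Set.ofList ((pvLoop n.toNat [("", strings)]).map Prod.fst)

-- ===== PRECONDITION & SPEC =====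
def Spec_build (strings : List String) (n : Int) (out : List String) : Prop := out = build_alt strings n
instance (strings : List String) (n : Int) (out : List String) : Decidable (Spec_build strings n out) := by unfold Spec_build; infer_instance

-- ===== CLAIM (what is proved, stated in full; the proofs are below) =====
def Claim_equal_build : Prop := ∀ (strings : List String) (n : Int), Dom_build strings n → Spec_build strings n (build strings n)

-- ===== LEMMAS AND PROOFS =====

-- the common flat generator: G k σ = all concatenations of k+1 pairwise-removed strings, in DFS order, with duplicates
def pvG : Nat → List String → List String
  | 0, σ => σ
  | k + 1, σ => σ.flatMap (fun s => (pvG k (PySem.Set.diff σ [s])).map (fun w => s ++ w))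

-- update ignores duplicates in its second argument
theorem pvUpdate_ofList {α : Type} [BEq α] [LawfulBEq α] (r : PySem.Set α) (M : List α) :
    PySem.Set.update r (PySem.Set.ofList M) = PySem.Set.update r M := by
  rw [PySem.Set.update_eq_append_filter, PySem.Set.update_eq_append_filter,
    PySem.Set.ofList_ofList]

-- folding update over a list is update of the flat concatenation
theorem pvFoldl_update {α β : Type} [BEq α] (σ : List β) (h : β → List α) (r : PySem.Set α) :
    σ.foldl (fun r s => PySem.Set.update r (h s)) r = PySem.Set.update r (σ.flatMap h) := by
  induction σ generalizing r with
  | nil => simp [PySem.Set.update]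
  | cons a σ ih => simp only [List.foldl_cons, List.flatMap_cons, PySem.Set.update_append, ih]

theorem pvAppend_inj (s : String) : Function.Injective (fun w => s ++ w) := by
  intro a b h
  have h2 := congrArg String.toList h
  simp at h2
  exact String.toList_inj.mp h2

-- add commutes with an injective map
theorem pvAdd_map {α β : Type} [BEq α] [LawfulBEq α] [BEq β] [LawfulBEq β]
    (f : α → β) (hf : Function.Injective f) (L : PySem.Set α) (x : α) :
    PySem.Set.add (L.map f) (f x) = (PySem.Set.add L x).map f := by
  by_cases hx : x ∈ L
  · rw [PySem.Set.add_of_mem (List.mem_map_of_mem hx), PySem.Set.add_of_mem hx]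
  · rw [PySem.Set.add_of_not_mem, PySem.Set.add_of_not_mem hx, List.map_append]
    · rfl
    · intro hc
      rcases List.mem_map.1 hc with ⟨y, hy, hxy⟩
      exact hx (hf hxy ▸ hy)

theorem pvOfList_map' {α β : Type} [BEq α] [LawfulBEq α] [BEq β] [LawfulBEq β]
    (f : α → β) (hf : Function.Injective f) (M : List α) :
    PySem.Set.ofList (M.map f) = (PySem.Set.ofList M).map f := by
  induction M using List.reverseRecOn with
  | nil => simp [PySem.Set.ofList]
  | append_singleton M x ih =>
    rw [List.map_append, List.map_singleton, PySem.Set.ofList_append_singleton,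
      PySem.Set.ofList_append_singleton, ih, pvAdd_map f hf]

-- the inner dedup of A's recursive result does not change the updated set
theorem pvUpdate_map_ofList (r : PySem.Set String) (s : String) (M : List String) :
    PySem.Set.update r ((PySem.Set.ofList M).map (fun w => s ++ w)) =
      PySem.Set.update r (M.map (fun w => s ++ w)) := by
  rw [← pvOfList_map' _ (pvAppend_inj s), pvUpdate_ofList]

-- A's recursion computes the dedup of the flat generator
theorem pvBuildA : ∀ (k : Nat) (σ : List String),
    build σ ((k : Int) + 2) = PySem.Set.ofList (pvG (k + 1) σ) := by
  intro k
  induction k with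
  | zero =>
    intro σ
    rw [build]
    have h1 : ((0 : Nat) : Int) + 2 ≠ 1 := by omega
    simp only [if_neg h1]
    have hb : ∀ τ : List String, build τ (((0 : Nat) : Int) + 2 - 1) = τ := by
      intro τ; rw [build]; norm_num
    simp only [hb, ← PySem.Set.update_map_eq_foldl_add, pvFoldl_update]
    show PySem.Set.update [] _ = PySem.Set.update [] _
    apply congrArg
    simp [pvG]
  | succ j ih =>
    intro σ
    rw [build]
    have h1 : ((j + 1 : Nat) : Int) + 2 ≠ 1 := by push_cast; omega
    have h2 : ((j + 1 : Nat) : Int) + 2 - 1 = (j : Int) + 2 := by push_cast; ring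
    simp only [if_neg h1, h2, ih, pvUpdate_map_ofList,
      ← PySem.Set.update_map_eq_foldl_add, pvFoldl_update]
    show PySem.Set.update [] _ = PySem.Set.update [] _
    apply congrArg
    simp [pvG]

-- A returns the empty set for n ≤ 0
theorem pvBuildA_nonpos (σ : List String) (n : Int) (hn : n ≤ 0) : build σ n = [] := by
  have main : ∀ (m : Nat) (σ : List String), σ.length ≤ m → ∀ n : Int, n ≤ 0 → build σ n = [] := by
    intro m
    induction m with
    | zero =>
      intro σ hσ n hn
      have : σ = [] := List.length_eq_zero_iff.mp (Nat.le_zero.mp hσ)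
      subst this
      rw [build]
      have : n ≠ 1 := by omega
      simp [this]
    | succ m ih =>
      intro σ hσ n hn
      rw [build]
      have h1 : n ≠ 1 := by omega
      simp only [if_neg h1]
      have hstep : ∀ (res : List String) (st : {x // x ∈ σ}), st ∈ σ.attach →
          (build (PySem.Set.diff σ [st.1]) (n - 1)).foldl
            (fun r w => PySem.Set.add r (st.1 ++ w)) res = res := by
        intro res st _
        have hlen : (PySem.Set.diff σ [st.1]).length ≤ m := by
          have := pvDiffLenLt σ st.1 st.2; omega
        rw [ih _ hlen (n - 1) (by omega)]
        rfl
      exact (PySem.List.foldl_congr_mem σ.attach _ (fun res _ => res) [] hstep).trans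
        (List.foldl_fixed σ.attach)
  exact main σ.length σ le_rfl n hn

theorem pvLoop_nil (k : Nat) : pvLoop k [] = [] := by
  induction k with
  | zero => rfl
  | succ k ih => simp [pvLoop]

theorem pvLoop_succ (k : Nat) (f : List (String × List String)) :
    pvLoop (k + 1) f = pvLoop k (pvExpand f) := by
  by_cases h : f = []
  · subst h
    have : pvExpand ([] : List (String × List String)) = [] := rfl
    simp [pvLoop, this, pvLoop_nil]
  · simp [pvLoop, h]

theorem pvLoop_append (k : Nat) (f g : List (String × List String)) :
    pvLoop k (f ++ g) = pvLoop k f ++ pvLoop k g := by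
  induction k generalizing f g with
  | zero => rfl
  | succ k ih =>
    rw [pvLoop_succ, pvLoop_succ, pvLoop_succ]
    have : pvExpand (f ++ g) = pvExpand f ++ pvExpand g := List.flatMap_append ..
    rw [this, ih]

theorem pvLoop_flat (k : Nat) (F : List (String × List String)) :
    pvLoop k F = F.flatMap (fun pr => pvLoop k [pr]) := by
  induction F with
  | nil => simp [pvLoop_nil]
  | cons x F ih =>
    have h1 : x :: F = [x] ++ F := rfl
    rw [h1, pvLoop_append, ih, List.flatMap_append]
    simp

-- B's frontier prefixes are the flat generator
theorem pvLoopB : ∀ (k : Nat) (p : String) (rem : List String),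
    (pvLoop (k + 1) [(p, rem)]).map Prod.fst = (pvG k rem).map (fun w => p ++ w) := by
  intro k
  induction k with
  | zero =>
    intro p rem
    rw [pvLoop_succ]
    simp [pvLoop, pvExpand, pvG, List.map_map, Function.comp_def]
  | succ j ih =>
    intro p rem
    rw [pvLoop_succ]
    have he : pvExpand [(p, rem)] =
        rem.map (fun s => (p ++ s, PySem.Set.diff rem [s])) := by
      simp [pvExpand]
    rw [he, pvLoop_flat, List.flatMap_map, List.map_flatMap]
    have hbody : ∀ s : String,
        (pvLoop (j + 1) [(p ++ s, PySem.Set.diff rem [s])]).map Prod.fst =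
          ((pvG j (PySem.Set.diff rem [s])).map (fun w => s ++ w)).map (fun w => p ++ w) := by
      intro s
      rw [ih]
      simp [List.map_map, Function.comp_def, String.append_assoc]
    simp only [hbody]
    rw [pvG, ← List.map_flatMap]

-- ===== VERDICT (by name: the statement is the Claim_ definition above) =====
theorem build_spec : Claim_equal_build := by
  intro σ n _
  unfold Spec_build
  by_cases h1 : n = 1
  · rw [build, build_alt]
    simp [h1]
  · by_cases h0 : n < 1
    · have hA : build σ n = [] := pvBuildA_nonpos σ n (by omega)
      rw [hA, build_alt, if_neg h1, if_pos h0]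
    · rw [build_alt, if_neg h1, if_neg h0]
      have ht : n.toNat = ((n.toNat - 2) + 1) + 1 := by omega
      rw [ht, pvLoopB]
      have hmap : (pvG ((n.toNat - 2) + 1) σ).map (fun w => "" ++ w) =
          pvG ((n.toNat - 2) + 1) σ := by
        simp
      rw [hmap]
      have hb := pvBuildA (n.toNat - 2) σ
      rw [show ((n.toNat - 2 : Nat) : Int) + 2 = n by omega] at hb
      rw [hb]
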